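-- pv_equiv track=rewrite | github.com/importrayhan/convqa_eval | convqa_eval/models/bilstm_crf/music_baselines.py | extract_multiturn_features
-- ===== SOURCE A (Python) =====
-- from typing import Dict, List, Tuple, Optional
--
-- def extract_multiturn_features(
--     turn_idx: int,
--     system_labels: List[int]
-- ) -> Dict[str, int]:
--     """
--     Extract multi-turn features for transition at turn_idx-1 → turn_idx.
--
--     Sequence structure: [user0, sys0, user1, sys1, user2, sys2, ...]
--     - Even indices: User utterances
--     - Odd indices: System utterances
--
--     Args:
--         turn_idx: Current turn index (0-based)
--         system_labels: Labels for all system turns SO FAR (for intime/distance)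
--
--     Returns:
--         Feature dict with who2who, position, intime, distance
--     """
--     if turn_idx == 0:
--         return {'who2who': -1, 'position': -1, 'intime': -1, 'distance': -1}
--
--     # Who2Who: Check speaker transition
--     # Even → Odd: User → System (0)
--     # Odd → Even: System → User (1)
--     prev_is_user = (turn_idx - 1) % 2 == 0
--     curr_is_user = turn_idx % 2 == 0
--
--     if prev_is_user and not curr_is_user:
--         who2who = 0  # User→System
--     elif not prev_is_user and curr_is_user:
--         who2who = 1  # System→User
--     else:
--         who2who = 2  # Same (shouldn't happen in normal flow)
--
--     # Position (clip to 19)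
--     position = min(turn_idx - 1, 19)
--
--     # Intime & Distance (only for System turns)
--     if turn_idx % 2 == 1:  # System turn (odd index)
--         system_turn_idx = turn_idx // 2
--
--         # Count prior system initiatives
--         if system_turn_idx > 0 and len(system_labels) >= system_turn_idx:
--             prior_initiatives = sum(
--                 1 for i in range(system_turn_idx)
--                 if i < len(system_labels) and system_labels[i] > 0
--             )
--         else:
--             prior_initiatives = 0
--
--         # Intime
--         if prior_initiatives == 0:
--             intime = 0
--         elif prior_initiatives == 1:
--             intime = 1
--         else:
--             intime = 2  # 2+
--
--         # Distance from last initiative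
--         if prior_initiatives > 0:
--             last_init_turn_idx = -1
--             for i in range(system_turn_idx - 1, -1, -1):
--                 if i < len(system_labels) and system_labels[i] > 0:
--                     last_init_turn_idx = i
--                     break
--
--             if last_init_turn_idx >= 0:
--                 last_init_seq_idx = last_init_turn_idx * 2 + 1
--                 dist = turn_idx - last_init_seq_idx
--                 distance = 0 if dist == 2 else 1  # 0=consecutive, 1=non-consecutive
--             else:
--                 distance = -1
--         else:
--             distance = -1
--     else:
--         intime = -1
--         distance = -1
--
--     return {
--         'who2who': who2who,
--         'position': position,
--         'intime': intime,
--         'distance': distance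
--     }
-- ===== SOURCE B (Python) =====
-- from typing import Dict, List
--
--
-- def extract_multiturn_features(
--     turn_idx: int,
--     system_labels: List[int]
-- ) -> Dict[str, int]:
--     # Simpler closed-form version: who2who from parity directly (adjacent turns
--     # always alternate speakers), intime = min(count, 2), and distance from a
--     # single lookup of the immediately preceding system label (the most recent
--     # initiative is consecutive exactly when that label is positive).
--     if turn_idx == 0:
--         return {'who2who': -1, 'position': -1, 'intime': -1, 'distance': -1}
--
--     who2who = 1 - turn_idx % 2
--     position = min(turn_idx - 1, 19)
--
--     intime = -1
--     distance = -1
--     if turn_idx % 2 == 1: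
--         s = turn_idx // 2
--         if 0 < s <= len(system_labels):
--             prior = sum(1 for x in system_labels[:s] if x > 0)
--         else:
--             prior = 0
--         intime = min(prior, 2)
--         if prior > 0:
--             distance = 0 if system_labels[s - 1] > 0 else 1
--
--     return {'who2who': who2who, 'position': position,
--             'intime': intime, 'distance': distance}
-- ===== Notes on version B (the rewrite author's own statement) =====
-- stated objective: simpler
-- what changed: Removes the backward last-initiative scan and the who2who branch chain: distance is computed from a single lookup of system_labels[s-1] (the last initiative is consecutive iff the immediately preceding system label is positive), who2who is the closed form 1 - turn_idx % 2, and intime is min(prior, 2).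
import Mathlib
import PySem

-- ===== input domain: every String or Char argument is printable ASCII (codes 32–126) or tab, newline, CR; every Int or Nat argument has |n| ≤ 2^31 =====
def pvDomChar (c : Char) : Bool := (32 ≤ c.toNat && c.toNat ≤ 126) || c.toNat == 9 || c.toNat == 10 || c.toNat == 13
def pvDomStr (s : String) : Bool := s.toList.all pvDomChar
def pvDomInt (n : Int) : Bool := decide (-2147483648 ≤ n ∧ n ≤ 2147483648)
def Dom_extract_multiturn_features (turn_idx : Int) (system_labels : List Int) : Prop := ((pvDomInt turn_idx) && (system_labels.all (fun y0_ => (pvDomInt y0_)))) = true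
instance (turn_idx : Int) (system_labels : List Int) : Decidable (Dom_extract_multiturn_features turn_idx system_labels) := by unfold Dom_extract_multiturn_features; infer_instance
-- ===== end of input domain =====

-- B removes A's backward last-initiative scan (one lookup of system_labels[s-1]
-- instead) and the who2who branch chain (closed form 1 - turn_idx % 2): simpler.

-- ===== PORT A =====
-- backward scan 'for i in range(system_turn_idx-1, -1, -1): if …: last=i; break'
-- (pyGetD is exact here: the guard i < len, with i ≥ 0 from the range, keeps the index in range)
def pvLastInit (r : List Int) (labels : List Int) : Int :=
  match r with
  | [] => -1
  | i :: rest =>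
      if i < (labels.length : Int) ∧ 0 < PySem.List.pyGetD labels i 0 then i
      else pvLastInit rest labels

def extract_multiturn_features (turn_idx : Int) (system_labels : List Int) : List (String × Int) :=
  if turn_idx = 0 then
    [("who2who", -1), ("position", -1), ("intime", -1), ("distance", -1)]
  else
    let prev_is_user := PySem.Int.mod (turn_idx - 1) 2 = 0
    let curr_is_user := PySem.Int.mod turn_idx 2 = 0
    let who2who : Int :=
      if prev_is_user ∧ ¬ curr_is_user then 0
      else if ¬ prev_is_user ∧ curr_is_user then 1
      else 2
    let position : Int := min (turn_idx - 1) 19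
    let id_pair : Int × Int :=
      if PySem.Int.mod turn_idx 2 = 1 then
        let system_turn_idx := PySem.Int.floordiv turn_idx 2
        let prior_initiatives : Int :=
          if system_turn_idx > 0 ∧ (system_labels.length : Int) ≥ system_turn_idx then
            (PySem.List.pyRange 0 system_turn_idx 1).foldl
              (fun acc i =>
                if i < (system_labels.length : Int) ∧ 0 < PySem.List.pyGetD system_labels i 0
                then acc + 1 else acc) 0
          else 0
        let intime : Int :=
          if prior_initiatives = 0 then 0
          else if prior_initiatives = 1 then 1
          else 2
        let distance : Int :=
          if prior_initiatives > 0 then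
            let last_init_turn_idx :=
              pvLastInit (PySem.List.pyRange (system_turn_idx - 1) (-1) (-1)) system_labels
            if last_init_turn_idx ≥ 0 then
              let last_init_seq_idx := last_init_turn_idx * 2 + 1
              let dist := turn_idx - last_init_seq_idx
              if dist = 2 then 0 else 1
            else -1
          else -1
        (intime, distance)
      else (-1, -1)
    [("who2who", who2who), ("position", position),
     ("intime", id_pair.1), ("distance", id_pair.2)]

-- ===== PORT B =====
def extract_multiturn_features_alt (turn_idx : Int) (system_labels : List Int) : List (String × Int) :=
  if turn_idx = 0 then
    [("who2who", -1), ("position", -1), ("intime", -1), ("distance", -1)]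
  else
    let who2who : Int := 1 - PySem.Int.mod turn_idx 2
    let position : Int := min (turn_idx - 1) 19
    let id_pair : Int × Int :=
      if PySem.Int.mod turn_idx 2 = 1 then
        let s := PySem.Int.floordiv turn_idx 2
        let prior : Int :=
          if 0 < s ∧ s ≤ (system_labels.length : Int) then
            ((PySem.List.slice system_labels none (some s)).filter (fun x => decide (0 < x))).length
          else 0
        let intime : Int := min prior 2
        -- pyGetD is exact: 0 < s ≤ len keeps the index s-1 in range
        let distance : Int :=
          if prior > 0 then
            (if 0 < PySem.List.pyGetD system_labels (s - 1) 0 then 0 else 1)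
          else -1
        (intime, distance)
      else (-1, -1)
    [("who2who", who2who), ("position", position),
     ("intime", id_pair.1), ("distance", id_pair.2)]

-- ===== PRECONDITION & SPEC =====
def Spec_extract_multiturn_features (turn_idx : Int) (system_labels : List Int) (out : List (String × Int)) : Prop := out = extract_multiturn_features_alt turn_idx system_labels
instance (turn_idx : Int) (system_labels : List Int) (out : List (String × Int)) : Decidable (Spec_extract_multiturn_features turn_idx system_labels out) := by unfold Spec_extract_multiturn_features; infer_instance

-- ===== CLAIM (what is proved, stated in full; the proofs are below) =====
def Claim_equal_extract_multiturn_features : Prop := ∀ (turn_idx : Int) (system_labels : List Int), Dom_extract_multiturn_features turn_idx system_labels → Spec_extract_multiturn_features turn_idx system_labels (extract_multiturn_features turn_idx system_labels)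

-- ===== LEMMAS AND PROOFS =====

-- A's prior-initiatives fold over range(s) counts the positive labels among the first s
theorem pv_count_fold (labels : List Int) :
    ∀ (n : Nat), n ≤ labels.length → ∀ (c : Int),
      (PySem.List.pyRange 0 (n : Int) 1).foldl
        (fun acc i =>
          if i < (labels.length : Int) ∧ 0 < PySem.List.pyGetD labels i 0
          then acc + 1 else acc) c
      = c + (((labels.take n).filter (fun x => decide (0 < x))).length : Int) := by
  intro n
  induction n with
  | zero => intro _ c; simp [PySem.List.pyRange_one_eq_nil]
  | succ m ih =>
      intro hm c
      have hmlt : m < labels.length := by omega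
      have hsplit : PySem.List.pyRange 0 ((m + 1 : Nat) : Int) 1
          = PySem.List.pyRange 0 (m : Int) 1 ++ [(m : Int)] := by
        have := PySem.List.pyRange_one_succ_right (a := 0) (b := (m : Int)) (by positivity)
        push_cast
        push_cast at this
        exact this
      rw [hsplit, List.foldl_append, ih (by omega) c]
      have htake : labels.take (m + 1) = labels.take m ++ [labels[m]] :=
        List.take_succ_eq_append_getElem hmlt
      have hget : PySem.List.pyGetD labels ((m : Nat) : Int) 0 = labels[m] := by
        rw [PySem.List.pyGetD_natCast]
        exact List.getD_eq_getElem labels 0 hmlt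
      simp only [List.foldl_cons, List.foldl_nil, htake, List.filter_append, List.length_append,
        hget]
      by_cases hpos : 0 < labels[m]
      · simp [hpos, hmlt]
        try omega
      · simp [hpos, hmlt]
        try omega

-- the backward scan, peeled one step at a time
theorem pv_scan_succ (labels : List Int) (m : Nat) :
    pvLastInit (PySem.List.pyRange (((m + 1 : Nat) : Int) - 1) (-1) (-1)) labels
      = if (m : Int) < (labels.length : Int) ∧ 0 < PySem.List.pyGetD labels (m : Int) 0
        then (m : Int)
        else pvLastInit (PySem.List.pyRange ((m : Int) - 1) (-1) (-1)) labels := by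
  have h : (((m + 1 : Nat) : Int) - 1) = (m : Int) := by push_cast; ring
  rw [h, PySem.List.pyRange_neg_one_cons (by omega)]
  rfl

-- if some label before position m is positive, the scan finds an index in [0, m)
theorem pv_scan_pos (labels : List Int) :
    ∀ (m : Nat), m ≤ labels.length →
      (∃ i, i < m ∧ 0 < labels.getD i 0) →
      0 ≤ pvLastInit (PySem.List.pyRange ((m : Int) - 1) (-1) (-1)) labels ∧
      pvLastInit (PySem.List.pyRange ((m : Int) - 1) (-1) (-1)) labels < (m : Int) := by
  intro m
  induction m with
  | zero => rintro _ ⟨i, hi, _⟩; omega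
  | succ k ih =>
      rintro hm ⟨i, hi, hpos⟩
      rw [pv_scan_succ]
      by_cases hc : (k : Int) < (labels.length : Int) ∧ 0 < PySem.List.pyGetD labels (k : Int) 0
      · rw [if_pos hc]; constructor <;> omega
      · rw [if_neg hc]
        have hk : k < labels.length := by omega
        have hget : PySem.List.pyGetD labels ((k : Nat) : Int) 0 = labels[k] := by
          rw [PySem.List.pyGetD_natCast]
          exact List.getD_eq_getElem labels 0 hk
        have hkneg : ¬ 0 < labels.getD k 0 := by
          intro h
          refine hc ⟨by exact_mod_cast hk, ?_⟩
          rw [PySem.List.pyGetD_natCast]; exact h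
      -- the witness cannot be k itself, so it is below k
        have hik : i < k := by
          rcases Nat.lt_succ_iff_lt_or_eq.mp hi with h | h
          · exact h
          · subst h; exact absurd hpos hkneg
        have := ih (by omega) ⟨i, hik, hpos⟩
        constructor
        · exact this.1
        · omega

-- a positive count among the first n labels yields a positive witness index below n
theorem pv_exists_of_count (labels : List Int) (n : Nat) (hn : n ≤ labels.length)
    (h : 0 < ((labels.take n).filter (fun x => decide (0 < x))).length) :
    ∃ i, i < n ∧ 0 < labels.getD i 0 := by
  rw [List.length_pos_iff] at h
  obtain ⟨x, hx⟩ := List.exists_mem_of_ne_nil _ h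
  have hx' := List.mem_filter.mp hx
  obtain ⟨i, hilen, hieq⟩ := List.mem_iff_getElem.mp hx'.1
  have hilen' : i < n := by
    have := labels.length_take_le n
    have h2 : (labels.take n).length = min n labels.length := labels.length_take
    omega
  have hil : i < labels.length := by
    have h2 : (labels.take n).length = min n labels.length := labels.length_take
    omega
  refine ⟨i, hilen', ?_⟩
  have hg : (labels.take n)[i]'hilen = labels[i]'hil := List.getElem_take
  rw [hg] at hieq
  rw [List.getD_eq_getElem labels 0 hil, hieq]
  simpa using hx'.2

-- ===== VERDICT (by name: the statement is the Claim_ definition above) =====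
theorem extract_multiturn_features_spec : Claim_equal_extract_multiturn_features := by
  intro t labels _
  unfold Spec_extract_multiturn_features
  simp only [extract_multiturn_features, extract_multiturn_features_alt]
  by_cases ht : t = 0
  · simp [ht]
  · rw [if_neg ht, if_neg ht]
    have hmod : PySem.Int.mod t 2 = t % 2 := PySem.Int.mod_eq_emod_of_pos (by omega)
    have hmod' : PySem.Int.mod (t - 1) 2 = (t - 1) % 2 := PySem.Int.mod_eq_emod_of_pos (by omega)
    have hfd : PySem.Int.floordiv t 2 * 2 + PySem.Int.mod t 2 = t :=
      PySem.Int.floordiv_mul_add_mod t 2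
    set s := PySem.Int.floordiv t 2 with hs
    by_cases hodd : PySem.Int.mod t 2 = 1
    · -- odd turn: system turn
      have hwho : (if PySem.Int.mod (t - 1) 2 = 0 ∧ ¬ PySem.Int.mod t 2 = 0 then (0 : Int)
          else if ¬ PySem.Int.mod (t - 1) 2 = 0 ∧ PySem.Int.mod t 2 = 0 then 1 else 2)
          = 1 - PySem.Int.mod t 2 := by
        rw [if_pos ⟨by omega, by omega⟩, hodd]
        omega
      rw [hwho, if_pos hodd, if_pos hodd]
      have ht2 : t = 2 * s + 1 := by omega
      by_cases hgood : 0 < s ∧ s ≤ (labels.length : Int)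
      · obtain ⟨hs0, hslen⟩ := hgood
        obtain ⟨n, hn⟩ : ∃ n : Nat, s = (n : Int) := ⟨s.toNat, by omega⟩
        have hnlen : n ≤ labels.length := by omega
        have hprior :
            (PySem.List.pyRange 0 s 1).foldl
              (fun acc i =>
                if i < (labels.length : Int) ∧ 0 < PySem.List.pyGetD labels i 0
                then acc + 1 else acc) 0
            = (((labels.take n).filter (fun x => decide (0 < x))).length : Int) := by
          rw [hn]
          have := pv_count_fold labels n hnlen 0
          rw [this]; ring
        have hA : s > 0 ∧ (labels.length : Int) ≥ s := ⟨hs0, hslen⟩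
        have hB : 0 < s ∧ s ≤ (labels.length : Int) := ⟨hs0, hslen⟩
        have hsl : PySem.List.slice labels none (some s) = labels.take n := by
          rw [hn]; exact PySem.List.slice_to_natCast labels n
        rw [if_pos hA, if_pos hB, hprior, hsl]
        set cnt : Int := (((labels.take n).filter (fun x => decide (0 < x))).length : Int) with hcnt
        have hcnt0 : 0 ≤ cnt := by positivity
        have hintime : (if cnt = 0 then (0:Int) else if cnt = 1 then 1 else 2) = min cnt 2 := by
          split_ifs <;> omega
        rw [hintime]
        by_cases hcp : 0 < cnt
        · rw [if_pos hcp, if_pos hcp]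
          -- slice vs take already folded into cnt; now the distance
          have hnn : 1 ≤ n := by omega
          obtain ⟨k, hk⟩ : ∃ k : Nat, n = k + 1 := ⟨n - 1, by omega⟩
          have hklen : k < labels.length := by omega
          have hgetk : PySem.List.pyGetD labels ((k : Nat) : Int) 0 = labels[k] := by
            rw [PySem.List.pyGetD_natCast]
            exact List.getD_eq_getElem labels 0 hklen
          have hsk : s - 1 = (k : Int) := by omega
          rw [hsk, hgetk]
          have hscan := pv_scan_succ labels k
          have hck : (((k + 1 : Nat) : Int) - 1) = (k : Int) := by push_cast; ring
          rw [hck] at hscan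
          rw [hscan]
          by_cases hpos : 0 < labels[k]
          · have hcond : (k : Int) < (labels.length : Int) ∧ 0 < PySem.List.pyGetD labels (k : Int) 0 := by
              refine ⟨by exact_mod_cast hklen, ?_⟩
              rw [hgetk]; exact hpos
            rw [if_pos hcond, if_pos hpos]
            rw [if_pos (show (k : Int) ≥ 0 by positivity)]
            rw [if_pos (show t - ((k : Int) * 2 + 1) = 2 by omega)]
          · have hcond : ¬ ((k : Int) < (labels.length : Int) ∧ 0 < PySem.List.pyGetD labels (k : Int) 0) := by
              intro hcc; rw [hgetk] at hcc; exact hpos hcc.2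
            rw [if_neg hcond, if_neg hpos]
            -- the count witness is strictly below k
            have hw : ∃ i, i < k ∧ 0 < labels.getD i 0 := by
              obtain ⟨i, hi, hp⟩ := pv_exists_of_count labels n hnlen (by rw [hcnt] at hcp; exact_mod_cast hcp)
              have hik : i < k := by
                rcases Nat.lt_succ_iff_lt_or_eq.mp (hk ▸ hi) with h | h
                · exact h
                · subst h
                  rw [List.getD_eq_getElem labels 0 hklen] at hp
                  exact absurd hp hpos
              exact ⟨i, hik, hp⟩
            have hb := pv_scan_pos labels k (by omega) hw
            rw [if_pos (by omega : pvLastInit (PySem.List.pyRange ((k : Int) - 1) (-1) (-1)) labels ≥ 0)]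
            rw [if_neg (by omega : ¬ t - (pvLastInit (PySem.List.pyRange ((k : Int) - 1) (-1) (-1)) labels * 2 + 1) = 2)]
        · rw [if_neg hcp, if_neg hcp]
      · have hA : ¬ (s > 0 ∧ (labels.length : Int) ≥ s) := fun h => hgood ⟨h.1, h.2⟩
        rw [if_neg hA, if_neg hgood]
        norm_num
    · -- even (nonzero) turn: user turn
      have hm2 : PySem.Int.mod t 2 = 0 := by omega
      have hwho : (if PySem.Int.mod (t - 1) 2 = 0 ∧ ¬ PySem.Int.mod t 2 = 0 then (0 : Int)
          else if ¬ PySem.Int.mod (t - 1) 2 = 0 ∧ PySem.Int.mod t 2 = 0 then 1 else 2)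
          = 1 - PySem.Int.mod t 2 := by
        rw [if_neg (by omega), if_pos ⟨by omega, hm2⟩, hm2]
        omega
      rw [hwho, if_neg hodd, if_neg hodd]
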